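-- pv_equiv track=rewrite | github.com/algowizzzz/ccr_calculators | chunk_complete_metrics.py | categorize_metric
-- ===== SOURCE A (Python) =====
-- def categorize_metric(metric_name, metric_info):
--     """Categorize a metric into one of 6 business function chunks"""
--     name_lower = metric_name.lower()
--     label_lower = (metric_info.get('label') or '').lower()
--     desc_lower = (metric_info.get('description') or '').lower()
--
--     combined_text = f"{name_lower} {label_lower} {desc_lower}"
--
--     # Chunk 1: Assets & Cash
--     if any(term in combined_text for term in [
--         'cash', 'securities', 'investment', 'trading', 'available', 'held',
--         'receivable', 'asset', 'equity', 'stock', 'bond', 'treasury'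
--     ]) and not any(term in combined_text for term in ['loan', 'credit', 'financing', 'mortgage']):
--         return 'assets_cash'
--
--     # Chunk 2: Liabilities & Deposits
--     elif any(term in combined_text for term in [
--         'liability', 'deposit', 'payable', 'debt', 'borrowing', 'obligation',
--         'due', 'accrued', 'customer', 'demand', 'time', 'savings'
--     ]):
--         return 'liabilities_deposits'
--
--     # Chunk 3: Loans & Credit
--     elif any(term in combined_text for term in [
--         'loan', 'credit', 'financing', 'mortgage', 'commercial', 'consumer',
--         'lease', 'allowance', 'provision', 'impairment', 'chargeoff', 'nonperforming'
--     ]):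
--         return 'loans_credit'
--
--     # Chunk 4: Revenue & Profitability
--     elif any(term in combined_text for term in [
--         'revenue', 'income', 'interest', 'fee', 'earnings', 'profit',
--         'gain', 'loss', 'margin', 'yield', 'dividend', 'commission'
--     ]):
--         return 'revenue_profit'
--
--     # Chunk 5: Risk & Capital Management
--     elif any(term in combined_text for term in [
--         'capital', 'risk', 'tier', 'ratio', 'adequacy', 'leverage',
--         'regulatory', 'basel', 'rwa', 'cet1', 'buffer'
--     ]):
--         return 'risk_capital'
--
--     # Chunk 6: Operations & Metadata (default)
--     else:
--         return 'operations_metadata'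
-- ===== SOURCE B (Python) =====
-- # Inverted index: a flat term -> category map; one pass collects the set of
-- # matched categories, then a short resolution step applies the priority order
-- # and the assets-vs-lending exclusion rule.
-- TERM_INDEX = [
--     ('cash', 'assets_cash'), ('securities', 'assets_cash'),
--     ('investment', 'assets_cash'), ('trading', 'assets_cash'),
--     ('available', 'assets_cash'), ('held', 'assets_cash'),
--     ('receivable', 'assets_cash'), ('asset', 'assets_cash'),
--     ('equity', 'assets_cash'), ('stock', 'assets_cash'),
--     ('bond', 'assets_cash'), ('treasury', 'assets_cash'),
--     ('liability', 'liabilities_deposits'), ('deposit', 'liabilities_deposits'),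
--     ('payable', 'liabilities_deposits'), ('debt', 'liabilities_deposits'),
--     ('borrowing', 'liabilities_deposits'), ('obligation', 'liabilities_deposits'),
--     ('due', 'liabilities_deposits'), ('accrued', 'liabilities_deposits'),
--     ('customer', 'liabilities_deposits'), ('demand', 'liabilities_deposits'),
--     ('time', 'liabilities_deposits'), ('savings', 'liabilities_deposits'),
--     ('loan', 'loans_credit'), ('credit', 'loans_credit'),
--     ('financing', 'loans_credit'), ('mortgage', 'loans_credit'),
--     ('commercial', 'loans_credit'), ('consumer', 'loans_credit'),
--     ('lease', 'loans_credit'), ('allowance', 'loans_credit'),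
--     ('provision', 'loans_credit'), ('impairment', 'loans_credit'),
--     ('chargeoff', 'loans_credit'), ('nonperforming', 'loans_credit'),
--     ('revenue', 'revenue_profit'), ('income', 'revenue_profit'),
--     ('interest', 'revenue_profit'), ('fee', 'revenue_profit'),
--     ('earnings', 'revenue_profit'), ('profit', 'revenue_profit'),
--     ('gain', 'revenue_profit'), ('loss', 'revenue_profit'),
--     ('margin', 'revenue_profit'), ('yield', 'revenue_profit'),
--     ('dividend', 'revenue_profit'), ('commission', 'revenue_profit'),
--     ('capital', 'risk_capital'), ('risk', 'risk_capital'),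
--     ('tier', 'risk_capital'), ('ratio', 'risk_capital'),
--     ('adequacy', 'risk_capital'), ('leverage', 'risk_capital'),
--     ('regulatory', 'risk_capital'), ('basel', 'risk_capital'),
--     ('rwa', 'risk_capital'), ('cet1', 'risk_capital'),
--     ('buffer', 'risk_capital'),
-- ]
--
-- # terms that veto the 'assets_cash' classification (lending vocabulary)
-- EXCLUDERS = ['loan', 'credit', 'financing', 'mortgage']
--
-- PRIORITY = ['liabilities_deposits', 'loans_credit', 'revenue_profit', 'risk_capital']
--
--
-- def categorize_metric(metric_name, metric_info):
--     """Categorize a metric into one of 6 business function chunks."""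
--     combined_text = "%s %s %s" % (
--         metric_name.lower(),
--         (metric_info.get('label') or '').lower(),
--         (metric_info.get('description') or '').lower(),
--     )
--     matched = {cat for term, cat in TERM_INDEX if term in combined_text}
--     if 'assets_cash' in matched and \
--             not any(term in combined_text for term in EXCLUDERS):
--         return 'assets_cash'
--     for cat in PRIORITY:
--         if cat in matched:
--             return cat
--     return 'operations_metadata'
-- ===== Notes on version B (the rewrite author's own statement) =====
-- stated objective: alternative
-- what changed: Replaces A's six if/elif branches each scanning its own keyword list with an inverted index (flat term-to-category map) traversed once to build the SET of matched categories, followed by a separate resolution step that applies the assets-vs-lending exclusion and the priority order to that set; correct because the 59 terms are pairwise distinct across categories.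
import Mathlib
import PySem

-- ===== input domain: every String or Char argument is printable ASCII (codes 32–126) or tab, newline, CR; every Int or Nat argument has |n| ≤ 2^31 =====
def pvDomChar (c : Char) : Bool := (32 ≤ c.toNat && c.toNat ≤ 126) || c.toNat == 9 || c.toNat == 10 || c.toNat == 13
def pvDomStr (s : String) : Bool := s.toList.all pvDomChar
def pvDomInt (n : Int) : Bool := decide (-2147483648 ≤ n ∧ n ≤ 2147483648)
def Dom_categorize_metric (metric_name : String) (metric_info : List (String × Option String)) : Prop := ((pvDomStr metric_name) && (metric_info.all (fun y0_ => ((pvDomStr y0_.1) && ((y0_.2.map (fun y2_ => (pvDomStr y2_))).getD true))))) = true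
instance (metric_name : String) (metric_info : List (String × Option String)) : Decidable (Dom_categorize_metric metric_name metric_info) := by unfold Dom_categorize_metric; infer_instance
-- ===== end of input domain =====

-- B replaces A's six hard-coded if/elif keyword scans with an inverted index
-- (flat term→category map) traversed once to build the set of matched categories,
-- plus a separate resolution step (objective: alternative, same cost).

-- ===== PORT A =====
-- Port of A's `metric_info.get(k) or ''`: a missing key or a None value both coerce to ''
-- (a present non-empty string is truthy; a present '' coerces to '' as well, same value).
def pvGetOrEmpty_A (metric_info : List (String × Option String)) (k : String) : String :=
  (((PySem.Dict.mk metric_info).get? k).getD none).getD ""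

def categorize_metric (metric_name : String) (metric_info : List (String × Option String)) : String :=
  let name_lower := PySem.Str.lower metric_name
  let label_lower := PySem.Str.lower (pvGetOrEmpty_A metric_info "label")
  let desc_lower := PySem.Str.lower (pvGetOrEmpty_A metric_info "description")
  let combined_text := name_lower ++ " " ++ label_lower ++ " " ++ desc_lower
  if ((["cash", "securities", "investment", "trading", "available", "held",
        "receivable", "asset", "equity", "stock", "bond", "treasury"].any
          (fun term => PySem.Str.isIn term combined_text)) &&
      !(["loan", "credit", "financing", "mortgage"].any
          (fun term => PySem.Str.isIn term combined_text))) then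
    "assets_cash"
  else if (["liability", "deposit", "payable", "debt", "borrowing", "obligation",
            "due", "accrued", "customer", "demand", "time", "savings"].any
             (fun term => PySem.Str.isIn term combined_text)) then
    "liabilities_deposits"
  else if (["loan", "credit", "financing", "mortgage", "commercial", "consumer",
            "lease", "allowance", "provision", "impairment", "chargeoff", "nonperforming"].any
             (fun term => PySem.Str.isIn term combined_text)) then
    "loans_credit"
  else if (["revenue", "income", "interest", "fee", "earnings", "profit",
            "gain", "loss", "margin", "yield", "dividend", "commission"].any
             (fun term => PySem.Str.isIn term combined_text)) then
    "revenue_profit"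
  else if (["capital", "risk", "tier", "ratio", "adequacy", "leverage",
            "regulatory", "basel", "rwa", "cet1", "buffer"].any
             (fun term => PySem.Str.isIn term combined_text)) then
    "risk_capital"
  else
    "operations_metadata"

-- ===== PORT B =====
-- Source B's TERM_INDEX: flat inverted index term → category
def pvTermIndex : List (String × String) :=
  [("cash", "assets_cash"), ("securities", "assets_cash"),
   ("investment", "assets_cash"), ("trading", "assets_cash"),
   ("available", "assets_cash"), ("held", "assets_cash"),
   ("receivable", "assets_cash"), ("asset", "assets_cash"),
   ("equity", "assets_cash"), ("stock", "assets_cash"),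
   ("bond", "assets_cash"), ("treasury", "assets_cash"),
   ("liability", "liabilities_deposits"), ("deposit", "liabilities_deposits"),
   ("payable", "liabilities_deposits"), ("debt", "liabilities_deposits"),
   ("borrowing", "liabilities_deposits"), ("obligation", "liabilities_deposits"),
   ("due", "liabilities_deposits"), ("accrued", "liabilities_deposits"),
   ("customer", "liabilities_deposits"), ("demand", "liabilities_deposits"),
   ("time", "liabilities_deposits"), ("savings", "liabilities_deposits"),
   ("loan", "loans_credit"), ("credit", "loans_credit"),
   ("financing", "loans_credit"), ("mortgage", "loans_credit"),
   ("commercial", "loans_credit"), ("consumer", "loans_credit"),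
   ("lease", "loans_credit"), ("allowance", "loans_credit"),
   ("provision", "loans_credit"), ("impairment", "loans_credit"),
   ("chargeoff", "loans_credit"), ("nonperforming", "loans_credit"),
   ("revenue", "revenue_profit"), ("income", "revenue_profit"),
   ("interest", "revenue_profit"), ("fee", "revenue_profit"),
   ("earnings", "revenue_profit"), ("profit", "revenue_profit"),
   ("gain", "revenue_profit"), ("loss", "revenue_profit"),
   ("margin", "revenue_profit"), ("yield", "revenue_profit"),
   ("dividend", "revenue_profit"), ("commission", "revenue_profit"),
   ("capital", "risk_capital"), ("risk", "risk_capital"),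
   ("tier", "risk_capital"), ("ratio", "risk_capital"),
   ("adequacy", "risk_capital"), ("leverage", "risk_capital"),
   ("regulatory", "risk_capital"), ("basel", "risk_capital"),
   ("rwa", "risk_capital"), ("cet1", "risk_capital"),
   ("buffer", "risk_capital")]

def pvExcluders : List String := ["loan", "credit", "financing", "mortgage"]

def pvPriority : List String :=
  ["liabilities_deposits", "loans_credit", "revenue_profit", "risk_capital"]

-- Source B's `for cat in PRIORITY: if cat in matched: return cat` loop
def pvFirstPriority (cats : List String) (matched : PySem.Set String) : String :=
  match cats with
  | [] => "operations_metadata"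
  | c :: rest =>
    if PySem.Set.contains matched c then c else pvFirstPriority rest matched

def pvLoweredField_B (metric_info : List (String × Option String)) (k : String) : String :=
  PySem.Str.lower ((((PySem.Dict.mk metric_info).get? k).getD none).getD "")

def categorize_metric_alt (metric_name : String) (metric_info : List (String × Option String)) : String :=
  let combined_text :=
    PySem.Str.lower metric_name ++ " " ++ pvLoweredField_B metric_info "label"
      ++ " " ++ pvLoweredField_B metric_info "description"
  -- {cat for term, cat in TERM_INDEX if term in combined_text}
  let matched : PySem.Set String :=
    PySem.Set.ofList
      ((pvTermIndex.filter (fun p => PySem.Str.isIn p.1 combined_text)).map (fun p => p.2))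
  if PySem.Set.contains matched "assets_cash" &&
     !(pvExcluders.any (fun term => PySem.Str.isIn term combined_text)) then
    "assets_cash"
  else
    pvFirstPriority pvPriority matched

-- ===== PRECONDITION & SPEC =====
def Spec_categorize_metric (metric_name : String) (metric_info : List (String × Option String)) (out : String) : Prop := out = categorize_metric_alt metric_name metric_info
instance (metric_name : String) (metric_info : List (String × Option String)) (out : String) : Decidable (Spec_categorize_metric metric_name metric_info out) := by unfold Spec_categorize_metric; infer_instance

-- ===== CLAIM =====
def Claim_equal_categorize_metric : Prop := ∀ (metric_name : String) (metric_info : List (String × Option String)), Dom_categorize_metric metric_name metric_info → Spec_categorize_metric metric_name metric_info (categorize_metric metric_name metric_info)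

-- ===== LEMMAS AND PROOFS =====

-- membership in the deduplicated set equals membership in the underlying list
theorem pvSetContains_ofList (m : List String) (c : String) :
    PySem.Set.contains (PySem.Set.ofList m) c = m.contains c := by
  rw [Bool.eq_iff_iff]
  simp [PySem.Set.mem_ofList]

-- ===== VERDICT =====
theorem categorize_metric_spec : Claim_equal_categorize_metric := by
  intro metric_name metric_info _
  unfold Spec_categorize_metric categorize_metric categorize_metric_alt
  simp only [pvGetOrEmpty_A, pvLoweredField_B, pvExcluders, pvPriority,
    pvFirstPriority, pvSetContains_ofList, pvTermIndex]
  simp [List.any_cons]
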